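-- pv_equiv track=rewrite | github.com/CodingThrust/problem-reductions | docs/paper/verify-reductions/adversary_exact_cover_by_3_sets_minimum_weight_solution_to_linear_equations.py | is_feasible_source
-- ===== SOURCE A (Python) =====
-- def is_feasible_source(universe_size, subsets, config):
--     """Check if config selects a valid exact cover."""
--     if len(config) != len(subsets):
--         return False
--
--     q = universe_size // 3
--     num_selected = sum(config)
--     if num_selected != q:
--         return False
--
--     covered = set()
--     for idx in range(len(config)):
--         if config[idx] == 1:
--             for elem in subsets[idx]:
--                 if elem in covered:
--                     return False
--                 covered.add(elem)
--
--     return covered == set(range(universe_size))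
-- ===== SOURCE B (Python) =====
-- def is_feasible_source(universe_size, subsets, config):
--     """Check if config selects a valid exact cover."""
--     if len(config) != len(subsets):
--         return False
--     if sum(config) != universe_size // 3:
--         return False
--     elems = []
--     for sel, sub in zip(config, subsets):
--         if sel == 1:
--             elems.extend(sub)
--     return sorted(elems) == list(range(universe_size))
-- ===== Notes on version B (the rewrite author's own statement) =====
-- stated objective: alternative
-- what changed: Replaces the incremental covered-set loop with early return on overlap by a sort-and-compare pass: collect all selected elements, then return sorted(elems) == list(range(universe_size)), which holds exactly when the elements are the multiset {0..n-1}.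
import Mathlib
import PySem

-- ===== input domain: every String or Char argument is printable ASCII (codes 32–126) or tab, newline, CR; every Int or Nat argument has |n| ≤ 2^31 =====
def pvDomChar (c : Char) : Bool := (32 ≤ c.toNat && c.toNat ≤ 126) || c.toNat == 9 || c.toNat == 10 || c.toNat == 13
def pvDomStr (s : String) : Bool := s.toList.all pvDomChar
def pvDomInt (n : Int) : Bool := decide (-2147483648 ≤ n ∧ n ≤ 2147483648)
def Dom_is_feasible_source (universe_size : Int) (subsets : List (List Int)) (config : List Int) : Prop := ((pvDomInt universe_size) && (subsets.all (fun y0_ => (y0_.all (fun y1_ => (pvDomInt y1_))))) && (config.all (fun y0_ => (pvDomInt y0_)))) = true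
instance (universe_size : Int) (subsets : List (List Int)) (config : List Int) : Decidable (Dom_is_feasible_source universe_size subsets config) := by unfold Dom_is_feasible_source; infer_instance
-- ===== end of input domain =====

-- B replaces A's incremental covered-set loop (early return on overlap, then set comparison)
-- by sort-and-compare: collect the selected elements and test sorted(elems) == list(range(n));
-- objective: alternative (a multiset-equality view of exact cover).

-- ===== PORT A =====
-- inner 'for elem in subsets[idx]': add elements, none = the 'return False' on an overlap
def pvCoverInner (elems : List Int) (covered : PySem.Set Int) : Option (PySem.Set Int) :=
  match elems with
  | [] => some covered
  | e :: rest =>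
    if PySem.Set.contains covered e then none
    else pvCoverInner rest (PySem.Set.add covered e)

-- outer 'for idx in range(len(config))': after the length guard config[idx]/subsets[idx]
-- traverse the two equal-length lists together (= indexing both by idx)
def pvCoverLoop (pairs : List (Int × List Int)) (covered : PySem.Set Int) : Option (PySem.Set Int) :=
  match pairs with
  | [] => some covered
  | (sel, sub) :: rest =>
    if sel = 1 then
      match pvCoverInner sub covered with
      | none => none
      | some c => pvCoverLoop rest c
    else pvCoverLoop rest covered

def is_feasible_source (universe_size : Int) (subsets : List (List Int)) (config : List Int) : Bool :=
  if config.length ≠ subsets.length then false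
  else if config.sum ≠ PySem.Int.floordiv universe_size 3 then false
  else
    match pvCoverLoop (config.zip subsets) PySem.Set.empty with
    | none => false
    | some covered => PySem.Set.equal covered (PySem.Set.ofList (PySem.List.pyRange 0 universe_size 1))

-- ===== PORT B =====
def is_feasible_source_alt (universe_size : Int) (subsets : List (List Int)) (config : List Int) : Bool :=
  if config.length ≠ subsets.length then false
  else if config.sum ≠ PySem.Int.floordiv universe_size 3 then false
  else
    let elems := (config.zip subsets).foldl
      (fun acc p => if p.1 = 1 then acc ++ p.2 else acc) []
    decide (PySem.List.sorted elems (fun x => x) false = PySem.List.pyRange 0 universe_size 1)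

-- ===== PRECONDITION & SPEC =====
def Spec_is_feasible_source (universe_size : Int) (subsets : List (List Int)) (config : List Int) (out : Bool) : Prop := out = is_feasible_source_alt universe_size subsets config
instance (universe_size : Int) (subsets : List (List Int)) (config : List Int) (out : Bool) : Decidable (Spec_is_feasible_source universe_size subsets config out) := by unfold Spec_is_feasible_source; infer_instance

-- ===== CLAIM (what is proved, stated in full; the proofs are below) =====
def Claim_equal_is_feasible_source : Prop := ∀ (universe_size : Int) (subsets : List (List Int)) (config : List Int), Dom_is_feasible_source universe_size subsets config → Spec_is_feasible_source universe_size subsets config (is_feasible_source universe_size subsets config)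

-- ===== LEMMAS AND PROOFS =====

theorem pvCoverInner_eq (elems : List Int) (c : PySem.Set Int) (hc : c.Nodup) :
    pvCoverInner elems c = if (c ++ elems).Nodup then some (c ++ elems) else none := by
  induction elems generalizing c with
  | nil => simp [pvCoverInner, hc]
  | cons e rest ih =>
    by_cases he : e ∈ c
    · have hcont : PySem.Set.contains c e = true := (PySem.Set.contains_iff c e).2 he
      have hnd : ¬ (c ++ e :: rest).Nodup := by
        intro h
        exact (List.nodup_append.1 h).2.2 e he e (by simp) rfl
      rw [pvCoverInner, hcont, if_pos rfl, if_neg hnd]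
    · have hcont : PySem.Set.contains c e = false := by
        by_contra h
        exact he ((PySem.Set.contains_iff c e).1 (by simpa using h))
      have hadd : PySem.Set.add c e = c ++ [e] := PySem.Set.add_of_not_mem he
      have hn : (c ++ [e]).Nodup := by
        simp [List.nodup_append, hc]
        exact fun a ha h => he (h ▸ ha)
      rw [pvCoverInner, hcont, if_neg (by simp), hadd, ih _ hn]
      simp [List.append_assoc]

def pvFlat (pairs : List (Int × List Int)) : List Int :=
  pairs.flatMap (fun p => if p.1 = 1 then p.2 else [])

theorem pvCoverLoop_eq (pairs : List (Int × List Int)) (c : PySem.Set Int) (hc : c.Nodup) :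
    pvCoverLoop pairs c = if (c ++ pvFlat pairs).Nodup then some (c ++ pvFlat pairs) else none := by
  induction pairs generalizing c with
  | nil => simp [pvCoverLoop, pvFlat, hc]
  | cons p rest ih =>
    obtain ⟨sel, sub⟩ := p
    by_cases hs : sel = 1
    · have hflat : pvFlat ((sel, sub) :: rest) = sub ++ pvFlat rest := by
        simp [pvFlat, hs]
      rw [pvCoverLoop, if_pos hs, pvCoverInner_eq _ _ hc, hflat]
      by_cases hn : (c ++ sub).Nodup
      · rw [if_pos hn]
        show pvCoverLoop rest (c ++ sub) = _
        rw [ih _ hn]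
        simp [List.append_assoc]
      · rw [if_neg hn, if_neg]
        intro h
        exact hn (h.sublist (by rw [← List.append_assoc]; exact List.sublist_append_left _ _))
    · have hflat : pvFlat ((sel, sub) :: rest) = pvFlat rest := by
        simp [pvFlat, hs]
      rw [pvCoverLoop, if_neg hs, ih _ hc, hflat]

-- the two tails agree: A's duplicate-free set comparison = B's sorted-list comparison
theorem pvFinal_eq (u : Int) (z : List (Int × List Int)) :
    (match (if (pvFlat z).Nodup then some (pvFlat z) else none : Option (PySem.Set Int)) with
      | none => false
      | some covered => PySem.Set.equal covered (PySem.Set.ofList (PySem.List.pyRange 0 u 1))) =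
    decide (PySem.List.sorted (pvFlat z) (fun x => x) false = PySem.List.pyRange 0 u 1) := by
  have hrnd : (PySem.List.pyRange 0 u 1).Nodup := PySem.List.nodup_pyRange_one 0 u
  have hrofl : PySem.Set.ofList (PySem.List.pyRange 0 u 1) = PySem.List.pyRange 0 u 1 :=
    PySem.Set.ofList_eq_self_of_nodup _ hrnd
  by_cases hn : (pvFlat z).Nodup
  · rw [if_pos hn, hrofl]
    show PySem.Set.equal (pvFlat z) (PySem.List.pyRange 0 u 1) = _
    by_cases hperm : (pvFlat z).Perm (PySem.List.pyRange 0 u 1)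
    · have hsorted : PySem.List.sorted (pvFlat z) (fun x => x) false = PySem.List.pyRange 0 u 1 :=
        PySem.List.sorted_eq_of_perm_of_pairwise_lt (pvFlat z) (PySem.List.pyRange 0 u 1)
          (fun x => x) hperm.symm (PySem.List.pairwise_lt_pyRange_one 0 u)
      have hmem : ∀ x : Int, x ∈ pvFlat z ↔ x ∈ PySem.List.pyRange 0 u 1 :=
        fun x => hperm.mem_iff
      rw [(PySem.Set.equal_iff _ _).2 hmem]
      simp [hsorted]
    · have hsorted : ¬ PySem.List.sorted (pvFlat z) (fun x => x) false = PySem.List.pyRange 0 u 1 := by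
        intro h
        exact hperm ((PySem.List.sorted_perm (pvFlat z) (fun x => x) false).symm.trans (h ▸ List.Perm.refl _))
      have hmem : ¬ ∀ x : Int, x ∈ pvFlat z ↔ x ∈ PySem.List.pyRange 0 u 1 := by
        intro h
        exact hperm ((List.perm_ext_iff_of_nodup hn hrnd).2 h)
      have heq : PySem.Set.equal (pvFlat z) (PySem.List.pyRange 0 u 1) = false := by
        by_contra h
        exact hmem ((PySem.Set.equal_iff _ _).1 (by simpa using h))
      rw [heq]
      simp [hsorted]
  · rw [if_neg hn]
    show false = _
    have hsorted : ¬ PySem.List.sorted (pvFlat z) (fun x => x) false = PySem.List.pyRange 0 u 1 := by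
      intro h
      have hperm : (pvFlat z).Perm (PySem.List.pyRange 0 u 1) :=
        (PySem.List.sorted_perm (pvFlat z) (fun x => x) false).symm.trans (h ▸ List.Perm.refl _)
      exact hn (hperm.symm.nodup hrnd)
    simp [hsorted]

-- ===== VERDICT (by name: the statement is the Claim_ definition above) =====
theorem is_feasible_source_spec : Claim_equal_is_feasible_source := by
  intro u subsets config _
  unfold Spec_is_feasible_source is_feasible_source is_feasible_source_alt
  by_cases h1 : config.length ≠ subsets.length
  · rw [if_pos h1, if_pos h1]
  · rw [if_neg h1, if_neg h1]
    by_cases h2 : config.sum ≠ PySem.Int.floordiv u 3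
    · rw [if_pos h2, if_pos h2]
    · rw [if_neg h2, if_neg h2]
      have hfun : (fun (acc : List Int) (p : Int × List Int) => if p.1 = 1 then acc ++ p.2 else acc)
          = (fun acc p => acc ++ (if p.1 = 1 then p.2 else [])) := by
        funext acc p; split <;> simp
      have hfoldl : (config.zip subsets).foldl
          (fun acc p => if p.1 = 1 then acc ++ p.2 else acc) ([] : List Int) =
          pvFlat (config.zip subsets) := by
        rw [hfun, PySem.List.foldl_append_eq_flatMap]; simp [pvFlat]
      have hloop := pvCoverLoop_eq (config.zip subsets) PySem.Set.empty List.nodup_nil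
      rw [hloop]
      simp only [PySem.Set.empty, List.nil_append, hfoldl]
      exact pvFinal_eq u (config.zip subsets)
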